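-- pv_equiv track=rewrite | github.com/erkhushigupta/python-fundamentals | Armstrong numbers between a given START and LIMIT range.py | gen_armstrong
-- ===== SOURCE A (Python) =====
-- def gen_armstrong(START, LIMIT):
--     armstrong_numbers = []
--
--     for num in range(START, LIMIT + 1):
--         num_str = str(num)
--         order = len(num_str)
--         sum_of_powers = sum(int(digit) ** order for digit in num_str)
--
--         if num == sum_of_powers:
--             armstrong_numbers.append(num)
--
--     return armstrong_numbers
-- ===== SOURCE B (Python) =====
-- def gen_armstrong(START, LIMIT):
--     result = []
--     hi = LIMIT
--     while hi >= START:
--         # find the digit count of hi and the lower end of its digit-count block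
--         order = 1
--         low = 10
--         while low <= hi:
--             low *= 10
--             order += 1
--         low //= 10
--         if order == 1:
--             low = START  # one-digit block extends down to START
--         # power table shared by the whole block
--         pw = [d ** order for d in range(10)]
--         stop = low if low > START else START
--         num = hi
--         while num >= stop:
--             total = 0
--             n = num
--             while n > 0:
--                 n, r = divmod(n, 10)
--                 total += pw[r]
--             if total == num:
--                 result.append(num)
--             num -= 1
--         hi = stop - 1
--     result.reverse()
--     return result
-- ===== Notes on version B (the rewrite author's own statement) =====
-- stated objective: faster
-- what changed: B scans the range downwards in blocks of equal digit count, computing the digit count and a table of d**order for d in 0..9 once per block so the per-number test is pure divmod arithmetic with table lookups (no str()/int() conversion and no per-digit exponentiation), building the result back-to-front and reversing once.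
import Mathlib
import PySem

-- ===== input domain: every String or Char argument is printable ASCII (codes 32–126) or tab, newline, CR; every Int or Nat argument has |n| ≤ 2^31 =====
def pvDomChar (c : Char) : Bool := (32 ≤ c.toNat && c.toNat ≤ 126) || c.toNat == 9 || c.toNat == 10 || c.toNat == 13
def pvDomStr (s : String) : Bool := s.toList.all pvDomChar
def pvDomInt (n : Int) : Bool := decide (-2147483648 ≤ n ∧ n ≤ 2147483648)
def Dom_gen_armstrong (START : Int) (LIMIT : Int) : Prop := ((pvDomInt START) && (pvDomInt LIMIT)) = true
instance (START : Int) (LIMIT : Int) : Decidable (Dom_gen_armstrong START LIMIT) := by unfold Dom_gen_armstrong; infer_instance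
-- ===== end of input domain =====

-- B replaces A's per-number str()/int() digit test by a descending block scan that computes the
-- digit count and a digit-power table once per digit-count block (objective: faster, constant factor).


-- ===== PORT A =====
-- 'int(digit)' raises ValueError on '-' (negative num); PySem.Int.ofStr? is none there, and the
-- '.getD 0' default is only reachable outside Pre_gen_armstrong.
def gen_armstrong (START : Int) (LIMIT : Int) : List Int :=
  (PySem.List.pyRange START (LIMIT + 1)).foldl
    (fun armstrong_numbers num =>
      let num_str := PySem.Int.toStr num
      let order := num_str.toList.length
      let sum_of_powers :=
        (num_str.toList.map
          (fun digit => ((PySem.Int.ofStr? (String.ofList [digit])).getD 0) ^ order)).sum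
      if num = sum_of_powers then armstrong_numbers ++ [num] else armstrong_numbers)
    []

-- ===== PORT B =====
-- Python's while-loops are ported as structural recursion on an explicit fuel argument that is
-- always large enough for the loop to run to completion (a plain totality guard; it changes no
-- reachable behaviour and embeds no proofs in the definitions).

-- 'order = 1; low = 10; while low <= hi: low *= 10; order += 1'
def pvBlock (fuel : Nat) (hi : Int) (order : Nat) (low : Int) : Nat × Int :=
  match fuel with
  | 0 => (order, low)
  | f + 1 => if low ≤ hi then pvBlock f hi (order + 1) (low * 10) else (order, low)

-- 'while n > 0: n, r = divmod(n, 10); total += pw[r]'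
def pvTotal (fuel : Nat) (n : Int) (pw : List Int) (total : Int) : Int :=
  match fuel with
  | 0 => total
  | f + 1 =>
    if 0 < n then
      pvTotal f (PySem.Int.floordiv n 10) pw (total + PySem.List.pyGetD pw (PySem.Int.mod n 10) 0)
    else total

-- 'while num >= stop: … num -= 1'
def pvInner (fuel : Nat) (stop : Int) (num : Int) (pw : List Int) (result : List Int) : List Int :=
  match fuel with
  | 0 => result
  | f + 1 =>
    if stop ≤ num then
      pvInner f stop (num - 1) pw
        (if pvTotal num.toNat num pw 0 = num then result ++ [num] else result)
    else result

-- outer 'while hi >= START' loop of B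
def pvOuter (fuel : Nat) (START : Int) (hi : Int) (result : List Int) : List Int :=
  match fuel with
  | 0 => result
  | f + 1 =>
    if START ≤ hi then
      let ol := pvBlock (hi.toNat + 1) hi 1 10
      let order := ol.1
      let low0 := PySem.Int.floordiv ol.2 10
      let low := if order = 1 then START else low0
      let pw := (PySem.List.pyRange 0 10).map (fun d => d ^ order)
      let stop := if START < low then low else START
      pvOuter f START (stop - 1) (pvInner (hi + 1 - stop).toNat stop hi pw result)
    else result

def gen_armstrong_alt (START : Int) (LIMIT : Int) : List Int :=
  (pvOuter (LIMIT + 1 - START).toNat START LIMIT []).reverse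

-- ===== PRECONDITION & SPEC =====
-- Pre_ excludes exactly the inputs on which A raises: a non-empty range starting below 0 makes
-- str(num) begin with '-' and int('-') raise ValueError.
def Pre_gen_armstrong (START : Int) (LIMIT : Int) : Prop := 0 ≤ START ∨ LIMIT < START
instance (START : Int) (LIMIT : Int) : Decidable (Pre_gen_armstrong START LIMIT) := by
  unfold Pre_gen_armstrong; infer_instance

def pvWitness_gen_armstrong : Int × Int := (0, 30)

def Spec_gen_armstrong (START : Int) (LIMIT : Int) (out : List Int) : Prop := out = gen_armstrong_alt START LIMIT
instance (START : Int) (LIMIT : Int) (out : List Int) : Decidable (Spec_gen_armstrong START LIMIT out) := by unfold Spec_gen_armstrong; infer_instance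

-- ===== CLAIM (what is proved, stated in full; the proofs are below) =====
def Claim_equal_gen_armstrong : Prop := ∀ (START : Int) (LIMIT : Int), Dom_gen_armstrong START LIMIT → Pre_gen_armstrong START LIMIT → Spec_gen_armstrong START LIMIT (gen_armstrong START LIMIT)


-- ===== LEMMAS AND PROOFS =====

-- digit-power sum of m with exponent e, over Nat.digits
def pvDigSum (m : Nat) (e : Nat) : Int := ((Nat.digits 10 m).map (fun d : Nat => (d : Int) ^ e)).sum

-- the digit count both programs use (len(str(m)); 1 for m = 0)
def pvLen (m : Nat) : Nat := if m = 0 then 1 else (Nat.digits 10 m).length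

-- the common mathematical per-number test
def pvQ (num : Int) : Bool := num = pvDigSum num.toNat (pvLen num.toNat)

-- characterisation of the pvBlock loop (given enough fuel)
theorem pvBlock_spec : ∀ (fuel : Nat) (hi low : Int) (o₀ : Nat), 0 < low → hi < low * 10 ^ fuel →
    ∃ k : Nat, pvBlock fuel hi o₀ low = (o₀ + k, low * 10 ^ k) ∧ hi < low * 10 ^ k ∧
      (k = 0 ∨ low * 10 ^ (k - 1) ≤ hi) := by
  intro fuel
  induction fuel with
  | zero =>
    intro hi low o₀ hlow hb
    refine ⟨0, by simp [pvBlock], by simpa using hb, Or.inl rfl⟩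
  | succ f ih =>
    intro hi low o₀ hlow hb
    rw [pvBlock]
    by_cases hlh : low ≤ hi
    · rw [if_pos hlh]
      obtain ⟨k', hb', hlt, hd⟩ := ih hi (low * 10) (o₀ + 1) (by positivity)
        (by calc hi < low * 10 ^ (f + 1) := hb
              _ = low * 10 * 10 ^ f := by ring)
      refine ⟨k' + 1, ?_, ?_, ?_⟩
      · rw [hb']
        simp only [Prod.mk.injEq]
        constructor
        · omega
        · ring
      · calc hi < low * 10 * 10 ^ k' := hlt
          _ = low * 10 ^ (k' + 1) := by ring
      · right
        simp only [Nat.add_sub_cancel]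
        by_cases hk0 : k' = 0
        · subst hk0
          simpa using hlh
        · have h1 : low * 10 * 10 ^ (k' - 1) ≤ hi := by
            rcases hd with h0 | h1
            · exact absurd h0 hk0
            · exact h1
          calc low * 10 ^ k' = low * 10 * 10 ^ (k' - 1) := by
                rw [mul_assoc, ← pow_succ']
                congr 2
                omega
            _ ≤ hi := h1
    · rw [if_neg hlh]
      refine ⟨0, by simp, ?_, Or.inl rfl⟩
      simp only [pow_zero, mul_one]
      omega

theorem pv_toDigitsCore_eq (fuel : Nat) : ∀ (m : Nat), m < fuel → ∀ (ds : List Char),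
    Nat.toDigitsCore 10 fuel m ds =
      (if m = 0 then ['0'] else ((Nat.digits 10 m).map Nat.digitChar).reverse) ++ ds := by
  induction fuel with
  | zero => intro m hm; omega
  | succ f ih =>
    intro m hm ds
    rw [Nat.toDigitsCore]
    by_cases h0 : m / 10 = 0
    · simp only [h0, reduceIte]
      by_cases hm0 : m = 0
      · subst hm0
        simp
        decide
      · have hmlt : m < 10 := by omega
        rw [if_neg hm0, Nat.digits_def' (by norm_num) (Nat.pos_of_ne_zero hm0), h0]
        simp [Nat.mod_eq_of_lt hmlt]
    · have hm0 : m ≠ 0 := by omega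
      rw [if_neg h0, ih (m / 10) (by omega) _, if_neg h0,
          Nat.digits_def' (by norm_num) (Nat.pos_of_ne_zero hm0), if_neg hm0]
      simp

theorem pv_toChars_nonneg (num : Int) (h : 0 ≤ num) :
    PySem.Int.toChars num =
      (if num.toNat = 0 then ['0'] else ((Nat.digits 10 num.toNat).map Nat.digitChar).reverse) := by
  rw [PySem.Int.toChars, if_neg (by omega), Nat.toDigits,
      pv_toDigitsCore_eq (num.toNat + 1) num.toNat (by omega)]
  simp

theorem pv_len_toChars (num : Int) (h : 0 ≤ num) :
    (PySem.Int.toChars num).length = pvLen num.toNat := by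
  rw [pv_toChars_nonneg num h, pvLen]
  by_cases hm : num.toNat = 0
  · simp [hm]
  · simp [hm]

theorem pv_ofStr_digitChar (d : Nat) (h : d < 10) :
    (PySem.Int.ofStr? (String.ofList [Nat.digitChar d])).getD 0 = (d : Int) := by
  interval_cases d <;> decide

-- A's per-number sum equals pvDigSum with exponent pvLen
theorem pv_strSum_eq (num : Int) (h : 0 ≤ num) :
    ((PySem.Int.toStr num).toList.map
       (fun digit => ((PySem.Int.ofStr? (String.ofList [digit])).getD 0) ^
          ((PySem.Int.toStr num).toList.length))).sum
      = pvDigSum num.toNat (pvLen num.toNat) := by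
  have hlen : (PySem.Int.toStr num).toList.length = pvLen num.toNat := by
    rw [PySem.Int.toList_toStr]
    exact pv_len_toChars num h
  rw [hlen, PySem.Int.toList_toStr, pv_toChars_nonneg num h]
  by_cases hm : num.toNat = 0
  · rw [if_pos hm, pvDigSum, hm]
    simp [pvLen]
    decide
  · rw [if_neg hm, pvDigSum]
    rw [List.map_reverse, List.sum_reverse, List.map_map]
    apply congrArg
    apply List.map_congr_left
    intro d hd
    have hdlt : d < 10 := Nat.digits_lt_base (by norm_num) hd
    simp only [Function.comp]
    rw [pv_ofStr_digitChar d hdlt]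

-- B's per-number total equals pvDigSum with the exponent baked into the power table
theorem pv_fdiv_natCast (m : Nat) : PySem.Int.floordiv (m : Int) 10 = ((m / 10 : Nat) : Int) := by
  simp only [PySem.Int.floordiv, Int.fdiv_eq_ediv]
  omega

theorem pv_fmod_natCast (m : Nat) : PySem.Int.mod (m : Int) 10 = ((m % 10 : Nat) : Int) := by
  simp only [PySem.Int.mod, Int.fmod_eq_emod]
  omega

theorem pv_pvTotal_eq (m : Nat) : ∀ (fuel : Nat), m ≤ fuel → ∀ (e : Nat) (tot : Int),
    pvTotal fuel (m : Int) ((PySem.List.pyRange 0 10).map (fun d => d ^ e)) tot = tot + pvDigSum m e := by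
  induction m using Nat.strong_induction_on with
  | _ m ih =>
    intro fuel hfuel e tot
    by_cases hm : m = 0
    · subst hm
      cases fuel with
      | zero => simp [pvTotal, pvDigSum]
      | succ f =>
        rw [pvTotal]
        simp [pvDigSum]
    · obtain ⟨f, rfl⟩ : ∃ f, fuel = f + 1 := ⟨fuel - 1, by omega⟩
      rw [pvTotal, if_pos (by exact_mod_cast Nat.pos_of_ne_zero hm),
          pv_fdiv_natCast, pv_fmod_natCast,
          PySem.List.pyGetD_map_pyRange_of_nonneg _ 10 _ 0 (by positivity)
            (by exact_mod_cast Nat.mod_lt m (by norm_num)),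
          ih (m / 10) (Nat.div_lt_self (Nat.pos_of_ne_zero hm) (by norm_num)) f
            (by omega) e]
      have hdig : pvDigSum m e = ((m % 10 : Nat) : Int) ^ e + pvDigSum (m / 10) e := by
        rw [pvDigSum, Nat.digits_def' (by norm_num : (1:Nat) < 10) (Nat.pos_of_ne_zero hm)]
        simp [pvDigSum]
      rw [hdig]
      ring

theorem pv_pvInner_eq (stop : Int) (pw : List Int) :
    ∀ (k : Nat) (hi : Int), (hi + 1 - stop).toNat ≤ k →
    (∀ num : Int, stop ≤ num → num ≤ hi → (pvTotal num.toNat num pw 0 = num ↔ pvQ num = true)) →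
    ∀ (res : List Int),
      pvInner k stop hi pw res =
        res ++ ((PySem.List.pyRange stop (hi + 1)).filter pvQ).reverse := by
  intro k
  induction k with
  | zero =>
    intro hi hk _ res
    rw [PySem.List.pyRange_one_eq_nil (by omega)]
    simp [pvInner]
  | succ k ih =>
    intro hi hk htest res
    by_cases hgo : stop ≤ hi
    · rw [pvInner, if_pos hgo,
          ih (hi - 1) (by omega) (fun num h1 h2 => htest num h1 (by omega)) _,
          show hi - 1 + 1 = hi by omega,
          PySem.List.pyRange_one_succ_right hgo,
          List.filter_append, List.reverse_append]
      rcases htest hi hgo le_rfl with ⟨hmp, hmpr⟩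
      by_cases hq : pvQ hi = true
      · rw [if_pos (hmpr hq)]
        simp [List.filter, hq]
      · rw [if_neg (fun he => hq (hmp he))]
        simp [List.filter, Bool.of_not_eq_true hq]
    · rw [pvInner, if_neg hgo, PySem.List.pyRange_one_eq_nil (by omega)]
      simp

theorem pv_len_eq (m : Nat) (e : Nat) (h1 : m < 10 ^ (e + 1)) (h2 : e = 0 ∨ 10 ^ e ≤ m) :
    pvLen m = e + 1 := by
  by_cases hm : m = 0
  · subst hm
    rcases h2 with h0 | h0
    · simp [pvLen, h0]
    · exfalso
      have : 0 < 10 ^ e := by positivity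
      omega
  · rw [pvLen, if_neg hm]
    have hle : (Nat.digits 10 m).length ≤ e + 1 := (Nat.digits_length_le_iff (by norm_num) m).mpr h1
    have hge : e < (Nat.digits 10 m).length := by
      rw [Nat.lt_digits_length_iff (by norm_num)]
      rcases h2 with h0 | h0
      · subst h0
        simpa using Nat.pos_of_ne_zero hm
      · exact h0
    omega

theorem pv_htest (e : Nat) (num : Int) (hnn : 0 ≤ num)
    (hlo : e = 0 ∨ (10 : Int) ^ e ≤ num) (hhi : num < (10 : Int) ^ (e + 1)) :
    (pvTotal num.toNat num ((PySem.List.pyRange 0 10).map (fun d => d ^ (e + 1))) 0 = num ↔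
      pvQ num = true) := by
  have hnum : ((num.toNat : Nat) : Int) = num := Int.toNat_of_nonneg hnn
  have hcast : ∀ j : Nat, ((10 ^ j : Nat) : Int) = (10 : Int) ^ j := by
    intro j
    push_cast
    ring
  have h1 : num.toNat < 10 ^ (e + 1) := by
    have := hcast (e + 1)
    omega
  have h2 : e = 0 ∨ 10 ^ e ≤ num.toNat := by
    rcases hlo with h0 | h0
    · exact Or.inl h0
    · right
      have := hcast e
      omega
  rw [show num = ((num.toNat : Nat) : Int) from hnum.symm]
  simp only [Int.toNat_natCast]
  rw [pv_pvTotal_eq num.toNat num.toNat le_rfl (e + 1) 0, zero_add, pvQ, Int.toNat_natCast,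
      pv_len_eq num.toNat e h1 h2]
  simp [eq_comm]

theorem pv_pvOuter_eq (START : Int) (hS : 0 ≤ START) :
    ∀ (k : Nat) (hi : Int), (hi + 1 - START).toNat ≤ k → ∀ (res : List Int),
      pvOuter k START hi res =
        res ++ ((PySem.List.pyRange START (hi + 1)).filter pvQ).reverse := by
  intro k
  induction k with
  | zero =>
    intro hi hk res
    rw [PySem.List.pyRange_one_eq_nil (by omega)]
    simp [pvOuter]
  | succ k ih =>
    intro hi hk res
    by_cases hgo : START ≤ hi
    · rw [pvOuter, if_pos hgo]
      have hbound : hi < (10 : Int) * 10 ^ (hi.toNat + 1) := by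
        have hN : hi.toNat < 10 * 10 ^ (hi.toNat + 1) := by
          calc hi.toNat < 10 ^ hi.toNat := Nat.lt_pow_self (by norm_num)
            _ ≤ 10 ^ (hi.toNat + 1) := Nat.pow_le_pow_right (by norm_num) (by omega)
            _ ≤ 10 * 10 ^ (hi.toNat + 1) := Nat.le_mul_of_pos_left _ (by norm_num)
        have hle : hi ≤ (hi.toNat : Int) := Int.self_le_toNat hi
        have hc := (Nat.cast_lt (α := Int)).mpr hN
        push_cast at hc
        omega
      obtain ⟨kk, hb, hlt, hd⟩ := pvBlock_spec (hi.toNat + 1) hi 10 1 (by norm_num) hbound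
      rw [hb]
      have hF : PySem.Int.floordiv ((10 : Int) * 10 ^ kk) 10 = 10 ^ kk :=
        Int.mul_fdiv_cancel_left _ (by norm_num)
      have hpow : (10 : Int) * 10 ^ kk = 10 ^ (kk + 1) := by
        rw [← pow_succ']
      by_cases hkk : kk = 0
      · subst hkk
        simp only [Nat.add_zero, reduceIte, lt_irrefl, if_false]
        rw [pv_pvInner_eq START _ (hi + 1 - START).toNat hi le_rfl
              (fun num h1 h2 => pv_htest 0 num (by omega) (Or.inl rfl)
                (by simpa using by omega : num < (10 : Int) ^ (0 + 1))) res]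
        rw [ih (START - 1) (by omega) _, show START - 1 + 1 = START by omega,
            PySem.List.pyRange_one_eq_nil le_rfl]
        simp
      · have hko : 1 + kk ≠ 1 := by omega
        have hge : (10 : Int) ^ kk ≤ hi := by
          rcases hd with h0 | h0
          · exact absurd h0 hkk
          · calc (10 : Int) ^ kk = 10 * 10 ^ (kk - 1) := by
                  rw [← pow_succ']
                  congr 1
                  omega
              _ ≤ hi := h0
        simp only [if_neg hko, hF]
        set S : Int := if START < (10 : Int) ^ kk then (10 : Int) ^ kk else START with hSdef
        have hS1 : START ≤ S := by rw [hSdef]; split <;> omega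
        have hS2 : S ≤ hi := by rw [hSdef]; split <;> omega
        have hS3 : (10 : Int) ^ kk ≤ S := by rw [hSdef]; split <;> omega
        have hone : 1 + kk = kk + 1 := by omega
        rw [hone]
        rw [pv_pvInner_eq S _ (hi + 1 - S).toNat hi le_rfl
              (fun num h1 h2 => pv_htest kk num (by omega) (Or.inr (by omega))
                (by rw [← hpow]; omega)) res]
        rw [ih (S - 1) (by omega) _, show S - 1 + 1 = S by omega,
            PySem.List.pyRange_one_append START S (hi + 1) (by omega) (by omega),
            List.filter_append, List.reverse_append, List.append_assoc]
    · rw [pvOuter, if_neg hgo, PySem.List.pyRange_one_eq_nil (by omega)]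
      simp

theorem pv_A_eq_filter (START LIMIT : Int) (hS : 0 ≤ START) :
    gen_armstrong START LIMIT =
      (PySem.List.pyRange START (LIMIT + 1)).filter pvQ := by
  rw [gen_armstrong]
  rw [PySem.List.foldl_append_ite_eq_filter
        (fun num => num =
          ((PySem.Int.toStr num).toList.map
            (fun digit => ((PySem.Int.ofStr? (String.ofList [digit])).getD 0) ^
              ((PySem.Int.toStr num).toList.length))).sum)]
  rw [List.nil_append]
  apply List.filter_congr
  intro num hmem
  have h0 : 0 ≤ num := by
    have := (PySem.List.mem_pyRange_one.mp hmem).1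
    omega
  rw [pvQ, pv_strSum_eq num h0]

-- ===== VERDICT (by name: the statement is the Claim_ definition above) =====
theorem gen_armstrong_spec : Claim_equal_gen_armstrong := by
  intro START LIMIT _ hpre
  unfold Spec_gen_armstrong gen_armstrong_alt
  rcases hpre with hS | hempty
  · rw [pv_A_eq_filter START LIMIT hS,
        pv_pvOuter_eq START hS (LIMIT + 1 - START).toNat LIMIT le_rfl []]
    simp
  · rw [gen_armstrong, show (LIMIT + 1 - START).toNat = 0 from by omega,
        PySem.List.pyRange_one_eq_nil (by omega : LIMIT + 1 ≤ START)]
    simp [pvOuter]
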